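-- pv_equiv track=rewrite | github.com/josephbill/CodilityAssessmentsStudies | 93codility/bricks.py | solution
-- ===== SOURCE A (Python) =====
-- def solution(A):
--     # First, check if it is possible to have 10 bricks in each box
--     #check to actual check if we can have 10 bricks in all boxes
--     total_bricks = sum(A)
--     n_boxes = len(A)
--     if total_bricks != 10 * n_boxes:
--         return -1
--
--     moves = 0
--     # Iterate over the boxes
--     for i in range(n_boxes):
--         # If the current box has more than 10 bricks,
--         # We need to move the excess to the next boxes
--         if A[i] > 10:
--             excess = A[i] - 10
--             A[i] -= excess
--             A[i+1] += excess
--             moves += excess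
--         # If the current box has less than 10 bricks,
--         # We need to bring the required number from the next boxes
--         elif A[i] < 10:
--             deficit = 10 - A[i]
--             A[i] += deficit
--             A[i+1] -= deficit
--             moves += deficit
--     return moves
-- ===== SOURCE B (Python) =====
-- def solution(A):
--     if sum(A) != 10 * len(A):
--         return -1
--     moves = 0
--     carry = 0
--     for x in A:
--         carry += x - 10
--         moves += abs(carry)
--     return moves
-- ===== Notes on version B (the rewrite author's own statement) =====
-- stated objective: simpler
-- what changed: Replaces the index loop with if/elif excess/deficit branches and in-place mutation of A[i]/A[i+1] by a single branch-free pass over the values maintaining a scalar running imbalance (carry) and summing its absolute value; B does not mutate the input list.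
import Mathlib
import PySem

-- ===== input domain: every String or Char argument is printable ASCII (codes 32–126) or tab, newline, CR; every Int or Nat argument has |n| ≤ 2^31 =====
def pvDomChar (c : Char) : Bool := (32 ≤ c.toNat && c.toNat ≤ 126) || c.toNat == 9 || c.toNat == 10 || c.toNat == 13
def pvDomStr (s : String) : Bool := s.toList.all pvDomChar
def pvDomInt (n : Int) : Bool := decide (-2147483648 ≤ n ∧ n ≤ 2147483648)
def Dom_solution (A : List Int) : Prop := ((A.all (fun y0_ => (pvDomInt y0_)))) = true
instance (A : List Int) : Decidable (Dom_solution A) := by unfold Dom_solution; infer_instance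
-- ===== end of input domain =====

-- B replaces A's branching in-place redistribution with a branch-free running-imbalance sweep
-- (objective: simpler); A mutates its argument list to all 10s on success, B does not — the
-- equivalence proved here is about the RETURN value only.

-- ===== PORT A =====
-- Loop body of A's `for i in range(n_boxes)` loop; state = (the mutated list A, moves).
-- The A[i+1] accesses are ported with the total forms pyGetD/pySetD: they are out of range
-- only where Python would raise IndexError (i + 1 = n with A[i] ≠ 10), which is unreachable
-- under the sum guard, so the default is never the computed value.
def solStep (st : List Int × Int) (i : Nat) : List Int × Int :=
  let l := st.1
  let moves := st.2
  let v := PySem.List.pyGetD l (i : Int) 0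
  if v > 10 then
    let excess := v - 10
    let l := PySem.List.pySetD l (i : Int) (v - excess)
    let l := PySem.List.pySetD l ((i : Int) + 1) (PySem.List.pyGetD l ((i : Int) + 1) 0 + excess)
    (l, moves + excess)
  else if v < 10 then
    let deficit := 10 - v
    let l := PySem.List.pySetD l (i : Int) (v + deficit)
    let l := PySem.List.pySetD l ((i : Int) + 1) (PySem.List.pyGetD l ((i : Int) + 1) 0 - deficit)
    (l, moves + deficit)
  else (l, moves)

def solution (A : List Int) : Int :=
  let total_bricks := A.sum
  let n_boxes := A.length
  if total_bricks ≠ 10 * (n_boxes : Int) then -1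
  else ((List.range n_boxes).foldl solStep (A, 0)).2

-- ===== PORT B =====
-- Loop body of B's `for x in A` loop; state = (carry, moves).
def altStep (st : Int × Int) (x : Int) : Int × Int :=
  let carry := st.1 + (x - 10)
  (carry, st.2 + |carry|)

def solution_alt (A : List Int) : Int :=
  if A.sum ≠ 10 * (A.length : Int) then -1
  else (A.foldl altStep (0, 0)).2

-- ===== PRECONDITION & SPEC =====
def Spec_solution (A : List Int) (out : Int) : Prop := out = solution_alt A
instance (A : List Int) (out : Int) : Decidable (Spec_solution A out) := by unfold Spec_solution; infer_instance

-- ===== CLAIM (what is proved, stated in full; the proofs are below) =====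
def Claim_equal_solution : Prop := ∀ (A : List Int), Dom_solution A → Spec_solution A (solution A)

-- ===== LEMMAS AND PROOFS =====

/-- Sum of absolute running imbalances of `xs` started at carry `c`. -/
def gmoves : List Int → Int → Int
  | [], _ => 0
  | x :: xs, c => |c + (x - 10)| + gmoves xs (c + (x - 10))

/-- Add `c` to the head of a list (the pending carry deposited into the next box). -/
def addHead (c : Int) : List Int → List Int
  | [] => []
  | y :: ys => (y + c) :: ys

theorem addHead_zero (l : List Int) : addHead 0 l = l := by
  cases l <;> simp [addHead]

theorem alt_fold (xs : List Int) : ∀ (c m : Int),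
    (xs.foldl altStep (c, m)).2 = m + gmoves xs c := by
  induction xs with
  | nil => intro c m; simp [gmoves]
  | cons x xs ih =>
    intro c m
    simp only [List.foldl_cons, altStep, gmoves]
    rw [ih]
    ring

theorem getD_append_len (p : List Int) (y : Int) (ys : List Int) :
    (p ++ y :: ys).getD p.length 0 = y := by
  simp [List.getD, List.getElem?_append_right]

theorem set_append_len (p : List Int) (y v : Int) (ys : List Int) :
    (p ++ y :: ys).set p.length v = p ++ v :: ys := by
  simp [List.set_append]

theorem a_fold (rest : List Int) : ∀ (p : List Int) (c m : Int),
    c + rest.sum = 10 * rest.length →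
    ((List.range' p.length rest.length).foldl solStep (p ++ addHead c rest, m)).2
      = m + gmoves rest c := by
  induction rest with
  | nil => intro p c m _; simp [gmoves]
  | cons x rs ih =>
    intro p c m hsum
    have hlen : (List.range' p.length (x :: rs).length)
        = p.length :: List.range' (p.length + 1) rs.length := by
      simp [List.range'_succ]
    rw [hlen, List.foldl_cons]
    have hv : PySem.List.pyGetD (p ++ addHead c (x :: rs)) ((p.length : Nat) : Int) 0
        = x + c := by
      simp [addHead, getD_append_len]
    have hcast : ((p.length : Int) + 1) = (((p.length + 1 : Nat)) : Int) := by push_cast; ring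
    cases rs with
    | nil =>
      -- one box left: the sum guard forces x + c = 10, the else branch is taken
      have hx : x + c = 10 := by simp at hsum; omega
      simp only [solStep, hv, hx]
      norm_num [gmoves, addHead]
      omega
    | cons y rs' =>
      simp only [solStep, hv]
      by_cases hgt : x + c > 10
      · rw [if_pos hgt]
        have hbody :
            (PySem.List.pySetD
              (PySem.List.pySetD (p ++ addHead c (x :: y :: rs')) ((p.length : Nat) : Int)
                (x + c - (x + c - 10)))
              ((p.length : Int) + 1)
              (PySem.List.pyGetD
                (PySem.List.pySetD (p ++ addHead c (x :: y :: rs')) ((p.length : Nat) : Int)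
                  (x + c - (x + c - 10))) ((p.length : Int) + 1) 0 + (x + c - 10)))
            = (p ++ [10]) ++ addHead (c + (x - 10)) (y :: rs') := by
          rw [hcast]
          simp only [PySem.List.pySetD_natCast, PySem.List.pyGetD_natCast, addHead]
          rw [set_append_len]
          have h10 : x + c - (x + c - 10) = 10 := by ring
          rw [h10]
          have : (p ++ 10 :: y :: rs') = (p ++ [10]) ++ y :: rs' := by simp
          rw [this]
          have hlen2 : p.length + 1 = (p ++ [10]).length := by simp
          rw [hlen2, getD_append_len, set_append_len]
          have : y + (x + c - 10) = y + (c + (x - 10)) := by ring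
          simp [this]
        simp only [hbody]
        have hlen2 : p.length + 1 = (p ++ [10]).length := by simp
        rw [hlen2]
        rw [ih (p ++ [10]) (c + (x - 10)) (m + (x + c - 10))
          (by simp at hsum ⊢; push_cast at hsum ⊢; omega)]
        have habs : |c + (x - 10)| = x + c - 10 := by rw [abs_of_pos (by omega)]; ring
        simp only [gmoves]
        rw [habs]
        ring
      · rw [if_neg hgt]
        by_cases hlt : x + c < 10
        · rw [if_pos hlt]
          have hbody :
              (PySem.List.pySetD
                (PySem.List.pySetD (p ++ addHead c (x :: y :: rs')) ((p.length : Nat) : Int)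
                  (x + c + (10 - (x + c))))
                ((p.length : Int) + 1)
                (PySem.List.pyGetD
                  (PySem.List.pySetD (p ++ addHead c (x :: y :: rs')) ((p.length : Nat) : Int)
                    (x + c + (10 - (x + c)))) ((p.length : Int) + 1) 0 - (10 - (x + c))))
              = (p ++ [10]) ++ addHead (c + (x - 10)) (y :: rs') := by
            rw [hcast]
            simp only [PySem.List.pySetD_natCast, PySem.List.pyGetD_natCast, addHead]
            rw [set_append_len]
            have h10 : x + c + (10 - (x + c)) = 10 := by ring
            rw [h10]
            have : (p ++ 10 :: y :: rs') = (p ++ [10]) ++ y :: rs' := by simp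
            rw [this]
            have hlen2 : p.length + 1 = (p ++ [10]).length := by simp
            rw [hlen2, getD_append_len, set_append_len]
            have : y - (10 - (x + c)) = y + (c + (x - 10)) := by ring
            simp [this]
          simp only [hbody]
          have hlen2 : p.length + 1 = (p ++ [10]).length := by simp
          rw [hlen2]
          rw [ih (p ++ [10]) (c + (x - 10)) (m + (10 - (x + c)))
            (by simp at hsum ⊢; push_cast at hsum ⊢; omega)]
          have habs : |c + (x - 10)| = 10 - (x + c) := by rw [abs_of_neg (by omega)]; ring
          simp only [gmoves]
          rw [habs]
          ring
        · rw [if_neg hlt]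
          have hx : x + c = 10 := by omega
          have hc0 : c + (x - 10) = 0 := by omega
          have hlist : (p ++ addHead c (x :: y :: rs')) = (p ++ [10]) ++ addHead 0 (y :: rs') := by
            simp [addHead, hx]
          rw [hlist]
          have hlen2 : p.length + 1 = (p ++ [10]).length := by simp
          rw [hlen2]
          rw [ih (p ++ [10]) 0 m (by simp at hsum ⊢; push_cast at hsum ⊢; omega)]
          simp [gmoves, hc0]

-- ===== VERDICT (by name: the statement is the Claim_ definition above) =====
theorem solution_spec : Claim_equal_solution := by
  intro A _
  unfold Spec_solution solution solution_alt
  by_cases hg : A.sum ≠ 10 * (A.length : Int)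
  · simp [hg]
  · simp only [hg, if_neg, not_not, if_false]
    push_neg at hg
    rw [alt_fold]
    have h := a_fold A [] 0 0 (by simpa using hg)
    rw [addHead_zero] at h
    simpa [List.range_eq_range'] using h
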